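-- pv_equiv track=rewrite | github.com/adityaai0611-ctrl/aiplanner | planner_v6.py | _reorder_agents
-- ===== SOURCE A (Python) =====
-- from typing import Any, Callable, Dict, List, Optional, Awaitable
--
-- def _reorder_agents(agents: List[str], preferred: List[str]) -> List[str]:
--     seen = set()
--     result = []
--     for a in preferred:
--         if a in agents and a not in seen:
--             result.append(a)
--             seen.add(a)
--     for a in agents:
--         if a not in seen:
--             result.append(a)
--     return result
-- ===== SOURCE B (Python) =====
-- def _reorder_agents(agents, preferred):
--     prio = {}
--     for i, p in enumerate(preferred):
--         prio.setdefault(p, i)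
--     front = sorted({a for a in agents if a in prio}, key=lambda a: prio[a])
--     back = [a for a in agents if a not in prio]
--     return front + back
-- ===== Notes on version B (the rewrite author's own statement) =====
-- stated objective: faster
-- what changed: B builds a first-occurrence priority dict over preferred, sorts the distinct preferred agents by that priority and appends the non-preferred agents unchanged, replacing A's interleaved seen-set scan whose 'a in agents' list-membership test is a linear scan per preferred element.
import Mathlib
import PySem

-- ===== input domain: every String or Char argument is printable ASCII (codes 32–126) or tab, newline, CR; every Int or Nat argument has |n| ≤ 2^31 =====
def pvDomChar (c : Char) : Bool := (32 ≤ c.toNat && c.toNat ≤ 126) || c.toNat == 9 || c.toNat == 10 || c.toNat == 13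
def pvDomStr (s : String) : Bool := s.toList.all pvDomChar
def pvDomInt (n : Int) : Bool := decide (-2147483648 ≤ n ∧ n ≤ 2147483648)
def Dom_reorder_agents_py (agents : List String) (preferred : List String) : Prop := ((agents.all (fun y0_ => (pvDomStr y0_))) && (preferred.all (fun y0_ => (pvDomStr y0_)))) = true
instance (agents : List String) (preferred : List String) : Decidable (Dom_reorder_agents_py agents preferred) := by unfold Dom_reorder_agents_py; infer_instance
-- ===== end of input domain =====

-- B replaces A's interleaved seen-set scan by a first-occurrence priority dict over
-- preferred, a key-sort of the distinct preferred agents, and a plain filter for the rest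
-- (return value only; neither version mutates its arguments).

-- ===== PORT A =====
def reorder_agents_py (agents : List String) (preferred : List String) : List String :=
  -- seen = set(); result = []; for a in preferred: if a in agents and a not in seen: append/add
  let st := preferred.foldl
    (fun (st : PySem.Set String × List String) a =>
      if agents.contains a && !(PySem.Set.contains st.1 a)
      then (PySem.Set.add st.1 a, st.2 ++ [a]) else st)
    (PySem.Set.empty, [])
  -- for a in agents: if a not in seen: result.append(a)
  agents.foldl (fun r a => if PySem.Set.contains st.1 a then r else r ++ [a]) st.2

-- ===== PORT B =====
def reorder_agents_py_alt (agents : List String) (preferred : List String) : List String :=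
  -- prio = {}; for i, p in enumerate(preferred): prio.setdefault(p, i)
  let prio := (PySem.List.enumerate preferred 0).foldl
    (fun (d : PySem.Dict String Int) ip => d.setdefault ip.2 ip.1) PySem.Dict.empty
  -- front = sorted({a for a in agents if a in prio}, key=lambda a: prio[a])
  -- (key exact: every element sorted is a key of prio, so prio[a] = prio.getD a 0;
  --  the key is injective on the set, so the sort does not depend on set iteration order)
  let front := PySem.List.sorted
    (PySem.Set.ofList (agents.filter (fun a => prio.contains a)))
    (fun a => prio.getD a 0) false
  -- back = [a for a in agents if a not in prio]
  let back := agents.filter (fun a => !(prio.contains a))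
  front ++ back

-- ===== PRECONDITION & SPEC =====
def Spec_reorder_agents_py (agents : List String) (preferred : List String) (out : List String) : Prop := out = reorder_agents_py_alt agents preferred
instance (agents : List String) (preferred : List String) (out : List String) : Decidable (Spec_reorder_agents_py agents preferred out) := by unfold Spec_reorder_agents_py; infer_instance

-- ===== CLAIM (what is proved, stated in full; the proofs are below) =====
def Claim_equal_reorder_agents_py : Prop := ∀ (agents : List String) (preferred : List String), Dom_reorder_agents_py agents preferred → Spec_reorder_agents_py agents preferred (reorder_agents_py agents preferred)

-- ===== LEMMAS AND PROOFS =====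

def gFront (agents : List String) (s : PySem.Set String) : List String → List String
  | [] => []
  | p :: ps =>
    if agents.contains p && !(PySem.Set.contains s p)
    then p :: gFront agents (PySem.Set.add s p) ps
    else gFront agents s ps

def gSeen (agents : List String) (s : PySem.Set String) : List String → PySem.Set String
  | [] => s
  | p :: ps =>
    if agents.contains p && !(PySem.Set.contains s p)
    then gSeen agents (PySem.Set.add s p) ps
    else gSeen agents s ps

theorem foldA_char (agents : List String) (P : List String) :
    ∀ (s : PySem.Set String) (res : List String),
    P.foldl (fun (st : PySem.Set String × List String) a =>
        if agents.contains a && !(PySem.Set.contains st.1 a)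
        then (PySem.Set.add st.1 a, st.2 ++ [a]) else st) (s, res)
      = (gSeen agents s P, res ++ gFront agents s P) := by
  induction P with
  | nil => intro s res; simp [gSeen, gFront]
  | cons p ps ih =>
    intro s res
    simp only [List.foldl_cons, gSeen, gFront]
    by_cases h : (agents.contains p && !(PySem.Set.contains s p)) = true
    · rw [if_pos h, if_pos h, if_pos h, ih]
      simp
    · rw [if_neg h, if_neg h, if_neg h, ih]

theorem mem_gFront (agents : List String) (P : List String) :
    ∀ (s : PySem.Set String) (a : String),
    a ∈ gFront agents s P ↔ a ∈ P ∧ a ∈ agents ∧ a ∉ s := by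
  induction P with
  | nil => intro s a; simp [gFront]
  | cons p ps ih =>
    intro s a
    simp only [gFront]
    by_cases h : (agents.contains p && !(PySem.Set.contains s p)) = true
    · rw [if_pos h]
      simp only [Bool.and_eq_true, Bool.not_eq_true', List.contains_iff_mem] at h
      have hpG : p ∈ agents := h.1
      have hps : p ∉ s := by simpa using h.2
      simp only [List.mem_cons, ih, PySem.Set.mem_add]
      constructor
      · rintro (rfl | ⟨h1, h2, h3⟩)
        · exact ⟨Or.inl rfl, hpG, hps⟩
        · exact ⟨Or.inr h1, h2, fun hm => h3 (Or.inl hm)⟩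
      · rintro ⟨(rfl | h1), h2, h3⟩
        · exact Or.inl rfl
        · by_cases hap : a = p
          · exact Or.inl hap
          · exact Or.inr ⟨h1, h2, by simp [hap, h3]⟩
    · rw [if_neg h]
      simp only [Bool.and_eq_true, Bool.not_eq_true', List.contains_iff_mem, not_and] at h
      rw [ih]
      simp only [List.mem_cons]
      constructor
      · rintro ⟨h1, h2, h3⟩; exact ⟨Or.inr h1, h2, h3⟩
      · rintro ⟨(rfl | h1), h2, h3⟩
        · exact absurd (by simpa using h h2) h3
        · exact ⟨h1, h2, h3⟩

theorem nodup_gFront (agents : List String) (P : List String) :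
    ∀ (s : PySem.Set String), (gFront agents s P).Nodup := by
  induction P with
  | nil => intro s; simp [gFront]
  | cons p ps ih =>
    intro s
    simp only [gFront]
    by_cases h : (agents.contains p && !(PySem.Set.contains s p)) = true
    · rw [if_pos h]
      refine List.nodup_cons.2 ⟨fun hmem => ?_, ih _⟩
      have := ((mem_gFront agents ps _ p).1 hmem).2.2
      exact this ((PySem.Set.mem_add s p p).2 (Or.inr rfl))
    · rw [if_neg h]; exact ih s

theorem mem_gSeen (agents : List String) (P : List String) :
    ∀ (s : PySem.Set String) (a : String),
    a ∈ gSeen agents s P ↔ a ∈ s ∨ a ∈ gFront agents s P := by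
  induction P with
  | nil => intro s a; simp [gSeen, gFront]
  | cons p ps ih =>
    intro s a
    simp only [gSeen, gFront]
    by_cases h : (agents.contains p && !(PySem.Set.contains s p)) = true
    · rw [if_pos h, if_pos h, ih]
      simp only [PySem.Set.mem_add, List.mem_cons]
      constructor
      · rintro ((h1 | rfl) | h1)
        · exact Or.inl h1
        · exact Or.inr (Or.inl rfl)
        · exact Or.inr (Or.inr h1)
      · rintro (h1 | (rfl | h1))
        · exact Or.inl (Or.inl h1)
        · exact Or.inl (Or.inr rfl)
        · exact Or.inr h1
    · rw [if_neg h, if_neg h, ih]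

def natIdx (P : List String) (a : String) : Nat := (PySem.List.index? P a).getD 0

theorem natIdx_cons_self (p : String) (ps : List String) : natIdx (p :: ps) p = 0 := by
  simp only [natIdx]
  rw [PySem.List.index?_cons_self]
  rfl

theorem natIdx_cons_of_ne (p a : String) (ps : List String) (h : p ≠ a) (hmem : a ∈ ps) :
    natIdx (p :: ps) a = natIdx ps a + 1 := by
  have h1 := PySem.List.index?_cons_of_ne (xs := ps) h
  have h2 : (PySem.List.index? ps a).isSome := (PySem.List.index?_isSome_iff ps a).2 hmem
  rcases ho : PySem.List.index? ps a with _ | k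
  · rw [ho] at h2; simp at h2
  · simp only [natIdx]
    rw [h1, ho]
    rfl

theorem pairwise_gFront (agents : List String) (P : List String) :
    ∀ (s : PySem.Set String),
    (gFront agents s P).Pairwise (fun a b => natIdx P a < natIdx P b) := by
  induction P with
  | nil => intro s; simp [gFront]
  | cons p ps ih =>
    intro s
    have key : ∀ (s' : PySem.Set String), p ∉ gFront agents s' ps →
        (gFront agents s' ps).Pairwise (fun a b => natIdx (p :: ps) a < natIdx (p :: ps) b) := by
      intro s' hp
      refine (ih s').imp_of_mem ?_
      intro a b ha hb hlt
      have haps := ((mem_gFront agents ps s' a).1 ha).1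
      have hbps := ((mem_gFront agents ps s' b).1 hb).1
      have hap : p ≠ a := fun e => hp (e ▸ ha)
      have hbp : p ≠ b := fun e => hp (e ▸ hb)
      rw [natIdx_cons_of_ne p a ps hap haps, natIdx_cons_of_ne p b ps hbp hbps]
      omega
    simp only [gFront]
    by_cases h : (agents.contains p && !(PySem.Set.contains s p)) = true
    · rw [if_pos h]
      have hp : p ∉ gFront agents (PySem.Set.add s p) ps := fun hm =>
        ((mem_gFront agents ps _ p).1 hm).2.2 ((PySem.Set.mem_add s p p).2 (Or.inr rfl))
      refine List.pairwise_cons.2 ⟨?_, key _ hp⟩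
      intro b hb
      have hbps := ((mem_gFront agents ps _ b).1 hb).1
      have hbp : p ≠ b := fun e => hp (e ▸ hb)
      rw [natIdx_cons_self, natIdx_cons_of_ne p b ps hbp hbps]
      omega
    · rw [if_neg h]
      refine key s ?_
      intro hm
      obtain ⟨hmem, hG, hns⟩ := (mem_gFront agents ps s p).1 hm
      simp only [Bool.and_eq_true, Bool.not_eq_true', List.contains_iff_mem, not_and] at h
      exact hns (by simpa using h hG)

theorem prio_get? (P : List String) :
    ∀ (n : Int) (d : PySem.Dict String Int) (a : String),
    ((PySem.List.enumerate P n).foldl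
        (fun (d : PySem.Dict String Int) ip => d.setdefault ip.2 ip.1) d).get? a
      = (d.get? a).or ((PySem.List.index? P a).map (fun k => (k : Int) + n)) := by
  induction P with
  | nil =>
    intro n d a
    rw [(PySem.List.index?_eq_none_iff [] a).2 (by simp)]
    simp [PySem.List.enumerate]
  | cons p ps ih =>
    intro n d a
    rw [PySem.List.enumerate_cons]
    simp only [List.foldl_cons]
    rw [ih]
    by_cases hap : a = p
    · subst hap
      rw [PySem.Dict.get?_setdefault_self, PySem.List.index?_cons_self]
      rcases hd : d.get? a with _ | v
      · simp
      · simp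
    · rw [PySem.Dict.get?_setdefault_of_ne d n hap,
        PySem.List.index?_cons_of_ne ps (fun e => hap e.symm)]
      cases PySem.List.index? ps a
      · simp
      · simp
        ring_nf

def buildPrio (P : List String) : PySem.Dict String Int :=
  (PySem.List.enumerate P 0).foldl
    (fun (d : PySem.Dict String Int) ip => d.setdefault ip.2 ip.1) PySem.Dict.empty

theorem buildPrio_get? (P : List String) (a : String) :
    (buildPrio P).get? a = (PySem.List.index? P a).map (fun k => (k : Int)) := by
  rw [buildPrio, prio_get? P 0 PySem.Dict.empty a]
  cases PySem.List.index? P a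
  · simp
  · simp

theorem buildPrio_contains (P : List String) (a : String) :
    (buildPrio P).contains a = decide (a ∈ P) := by
  rw [PySem.Dict.contains_eq_isSome_get?, buildPrio_get?]
  cases hm : PySem.List.index? P a with
  | none =>
    have : a ∉ P := (PySem.List.index?_eq_none_iff P a).1 hm
    simp [this]
  | some k =>
    have : a ∈ P := (PySem.List.index?_isSome_iff P a).1 (by rw [hm]; rfl)
    simp [this]

theorem buildPrio_getD (P : List String) (a : String) (h : a ∈ P) :
    (buildPrio P).getD a 0 = (natIdx P a : Int) := by
  rw [PySem.Dict.getD_eq_get?_getD, buildPrio_get?]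
  have h2 : (PySem.List.index? P a).isSome := (PySem.List.index?_isSome_iff P a).2 h
  cases hm : PySem.List.index? P a with
  | none => rw [hm] at h2; simp at h2
  | some k =>
    simp only [natIdx]
    rw [hm]
    simp


theorem ports_agree (G P : List String) : reorder_agents_py G P = reorder_agents_py_alt G P := by
  have halt : reorder_agents_py_alt G P
      = PySem.List.sorted (PySem.Set.ofList (G.filter (fun a => (buildPrio P).contains a)))
          (fun a => (buildPrio P).getD a 0) false
        ++ G.filter (fun a => !((buildPrio P).contains a)) := rfl
  have hA : reorder_agents_py G P
      = G.foldl (fun r a => if PySem.Set.contains (gSeen G PySem.Set.empty P) a then r else r ++ [a])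
          (gFront G PySem.Set.empty P) := by
    simp only [reorder_agents_py]
    rw [foldA_char G P PySem.Set.empty []]
    simp
  -- membership in the final seen set, for a ∈ G
  have hseen : ∀ a ∈ G, (PySem.Set.contains (gSeen G PySem.Set.empty P) a = true) ↔ a ∈ P := by
    intro a ha
    rw [PySem.Set.contains_iff, mem_gSeen, mem_gFront]
    simp [PySem.Set.empty, ha]
  have hback : ∀ (init : List String),
      G.foldl (fun r a => if PySem.Set.contains (gSeen G PySem.Set.empty P) a then r else r ++ [a]) init
        = init ++ G.filter (fun a => !(PySem.Set.contains (gSeen G PySem.Set.empty P) a)) := by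
    intro init
    rw [← PySem.List.foldl_append_if_eq_filter
      (fun a => !(PySem.Set.contains (gSeen G PySem.Set.empty P) a)) G init]
    apply PySem.List.foldl_congr_mem
    intro acc x _
    cases PySem.Set.contains (gSeen G PySem.Set.empty P) x <;> simp
  have hfilters : G.filter (fun a => !(PySem.Set.contains (gSeen G PySem.Set.empty P) a))
      = G.filter (fun a => !((buildPrio P).contains a)) := by
    apply List.filter_congr
    intro a ha
    rw [buildPrio_contains]
    cases hc : PySem.Set.contains (gSeen G PySem.Set.empty P) a
    · have : a ∉ P := fun hp => by rw [(hseen a ha).2 hp] at hc; cases hc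
      simp [this]
    · have : a ∈ P := (hseen a ha).1 hc
      simp [this]
  have hfront : PySem.List.sorted (PySem.Set.ofList (G.filter (fun a => (buildPrio P).contains a)))
      (fun a => (buildPrio P).getD a 0) false = gFront G PySem.Set.empty P := by
    apply PySem.List.sorted_eq_of_perm_of_pairwise_lt
    · rw [List.perm_ext_iff_of_nodup (nodup_gFront G P PySem.Set.empty)
        (PySem.Set.nodup_ofList _)]
      intro a
      rw [mem_gFront, PySem.Set.mem_ofList, List.mem_filter, buildPrio_contains]
      simp [PySem.Set.empty, and_comm]
    · refine (pairwise_gFront G P PySem.Set.empty).imp_of_mem ?_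
      intro a b ha hb hlt
      have haP := ((mem_gFront G P PySem.Set.empty a).1 ha).1
      have hbP := ((mem_gFront G P PySem.Set.empty b).1 hb).1
      rw [buildPrio_getD P a haP, buildPrio_getD P b hbP]
      exact_mod_cast hlt
  rw [hA, hback, hfilters, halt, hfront]

-- ===== VERDICT (by name: the statement is the Claim_ definition above) =====
theorem reorder_agents_py_spec : Claim_equal_reorder_agents_py := by
  intro agents preferred _
  exact ports_agree agents preferred
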